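-- pv_equiv track=rewrite | github.com/alex-am/pyalgo | pyalgo/play/trade.py | bf_all
-- ===== SOURCE A (Python) =====
-- def single_best(prices, index_start, index_end):
--     # pretty horrible implementation
--     # brute force could be improved
--     # l = index_end - index_start + 1
--     # O(l**2)
--     res = []
--     for s in range(index_start, index_end):
--         res.append(max(prices[(s+1):(index_end+1)]) - prices[s])
--     return max(res)
--
-- def bf_all(prices):
--     # best for 1 trade between index i and j
--     # pretty bad could be pythonified a bit
--     # O(l**2 * single_best) = O(l**4) pretty bad
--     S = []
--     l = len(prices)
--     for s in range(0, l-1):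
--         n_l = [None] * l
--         for e in range(s+1, l):
--             #bf result
--             # for n_s in range(s, e):
--             #     res = max(prices[(n_s+1):(e+1)]) - prices[n_s]
--             #     m.append(res)
--             # n_l[e] = max(m)
--             n_l[e] = single_best(prices, s, e)
--         S.append(n_l)
--     return S
-- ===== SOURCE B (Python) =====
-- def bf_all(prices):
--     # Per start s: one left-to-right pass keeping the running min price and running
--     # best profit, instead of recomputing single_best from scratch for every end.
--     l = len(prices)
--     S = []
--     for s in range(l - 1):
--         row = [None] * (s + 1)
--         minp = prices[s]
--         best = None
--         for p in prices[s + 1:]: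
--             cand = p - minp
--             if best is None or cand > best:
--                 best = cand
--             row.append(best)
--             if p < minp:
--                 minp = p
--         S.append(row)
--     return S
-- ===== Notes on version B (the rewrite author's own statement) =====
-- stated objective: faster
-- what changed: Replaces the per-(s,e) brute-force single_best (max over all buy points of a fresh slice max) by one left-to-right pass per start s that keeps a running min price and running best profit, filling each row incrementally.
import Mathlib
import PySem

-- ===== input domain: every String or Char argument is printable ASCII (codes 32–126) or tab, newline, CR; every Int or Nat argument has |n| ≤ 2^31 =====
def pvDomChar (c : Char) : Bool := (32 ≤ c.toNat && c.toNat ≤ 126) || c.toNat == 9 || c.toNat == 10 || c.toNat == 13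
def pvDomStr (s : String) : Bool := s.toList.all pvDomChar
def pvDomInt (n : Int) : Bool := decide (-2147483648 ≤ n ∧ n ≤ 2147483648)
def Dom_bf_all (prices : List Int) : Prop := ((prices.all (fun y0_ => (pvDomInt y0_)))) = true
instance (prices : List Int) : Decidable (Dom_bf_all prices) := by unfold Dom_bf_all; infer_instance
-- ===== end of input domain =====

-- B replaces A's O(l^4) brute force (fresh slice-max per buy point per (s,e)) by one
-- running-min/running-best pass per start s (O(l^2)); return values are identical.

-- ===== PORT A =====
def single_best (prices : List Int) (index_start index_end : Int) : Option Int := do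
  -- res = []; for s in range(index_start, index_end): res.append(max(prices[s+1:index_end+1]) - prices[s]); return max(res)
  let res ← (PySem.List.pyRange index_start index_end 1).mapM (fun s => do
    let m ← PySem.List.max? (PySem.List.slice prices (some (s+1)) (some (index_end+1))) (fun x => x)
    let p ← PySem.List.pyGet? prices s
    pure (m - p))
  PySem.List.max? res (fun x => x)

def bf_all (prices : List Int) : List (List (Option Int)) :=
  let l : Int := prices.length
  (PySem.List.pyRange 0 (l-1) 1).foldl (fun S s =>
    let n_l : List (Option Int) := List.replicate prices.length none
    let n_l := (PySem.List.pyRange (s+1) l 1).foldl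
      (fun nl e => nl.set e.toNat (single_best prices s e)) n_l
    S ++ [n_l]) []

-- ===== PORT B =====
def bfRow (prices : List Int) (s : Nat) : List (Option Int) :=
  let minp0 := prices.getD s 0
  let st := (prices.drop (s+1)).foldl (fun st p =>
      let cand := p - st.1
      let best' : Option Int := match st.2.1 with
        | none => some cand
        | some b => if cand > b then some cand else some b
      (if p < st.1 then p else st.1, best', st.2.2 ++ [best']))
    (minp0, (none : Option Int), List.replicate (s+1) (none : Option Int))
  st.2.2

def bf_all_alt (prices : List Int) : List (List (Option Int)) :=
  (List.range (prices.length - 1)).foldl (fun S s => S ++ [bfRow prices s]) []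

-- ===== PRECONDITION & SPEC =====
def Spec_bf_all (prices : List Int) (out : List (List (Option Int))) : Prop := out = bf_all_alt prices
instance (prices : List Int) (out : List (List (Option Int))) : Decidable (Spec_bf_all prices out) := by unfold Spec_bf_all; infer_instance

-- ===== CLAIM (what is proved, stated in full; the proofs are below) =====
def Claim_equal_bf_all : Prop := ∀ (prices : List Int), Dom_bf_all prices → Spec_bf_all prices (bf_all prices)

-- ===== LEMMAS AND PROOFS =====

-- running max/min of a :: t
def maxT (a : Int) (t : List Int) : Int := t.foldl max a
def minT (a : Int) (t : List Int) : Int := t.foldl min a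

-- A's recursion (single_best) as a pure function on the window a :: y :: ys
def sbF : Int → Int → List Int → Int
  | a, y, [] => y - a
  | a, y, z :: ys => max (maxT y (z :: ys) - a) (sbF y z ys)

-- B's incremental recursion: list of running bests
def bests : Int → Int → List Int → List Int
  | _, _, [] => []
  | minp, b, y :: ys =>
    let b' := max b (y - minp)
    b' :: bests (min minp y) b' ys

def bests0 : Int → List Int → List Int
  | _, [] => []
  | a, y :: ys => (y - a) :: bests (min a y) (y - a) ys

theorem maxT_out (a b : Int) (t : List Int) : t.foldl max (max a b) = max a (t.foldl max b) := by
  induction t generalizing b with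
  | nil => rfl
  | cons z t ih => simp only [List.foldl_cons, max_assoc, ih]

theorem minT_out (a b : Int) (t : List Int) : t.foldl min (min a b) = min a (t.foldl min b) := by
  induction t generalizing b with
  | nil => rfl
  | cons z t ih => simp only [List.foldl_cons, min_assoc, ih]

theorem maxT_append (a : Int) (t : List Int) (z : Int) : maxT a (t ++ [z]) = max (maxT a t) z := by
  simp [maxT, List.foldl_append]

theorem minT_append (a : Int) (t : List Int) (z : Int) : minT a (t ++ [z]) = min (minT a t) z := by
  simp [minT, List.foldl_append]

-- F→G: appending one price to the window updates the best via the running min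
theorem sbF_append (ys : List Int) (a y z : Int) :
    sbF a y (ys ++ [z]) = max (sbF a y ys) (z - minT a (y :: ys)) := by
  induction ys generalizing a y with
  | nil =>
    simp only [List.nil_append, sbF, maxT, minT, List.foldl_cons, List.foldl_nil]
    omega
  | cons z' ys ih =>
    simp only [List.cons_append, sbF, ih]
    have hmax : maxT y (z' :: (ys ++ [z])) = max (maxT y (z' :: ys)) z := by
      simpa using maxT_append y (z' :: ys) z
    have hmin : minT a (y :: z' :: ys) = min a (minT y (z' :: ys)) := by
      simp only [minT, List.foldl_cons]
      rw [min_assoc, minT_out]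
    rw [hmax, hmin]
    simp only [max_def, min_def]
    split_ifs <;> omega

theorem take_bests (t : List Int) (a y : Int) (mid : List Int) :
    (List.range t.length).map (fun k => sbF a y (mid ++ t.take (k+1)))
      = bests (minT a (y :: mid)) (sbF a y mid) t := by
  induction t generalizing mid with
  | nil => rfl
  | cons z t ih =>
    rw [List.length_cons, List.range_succ_eq_map, List.map_cons, List.map_map]
    simp only [Function.comp_def, List.take_succ_cons, List.take_zero,
      bests]
    have h1 : sbF a y (mid ++ [z]) = max (sbF a y mid) (z - minT a (y :: mid)) :=
      sbF_append mid a y z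
    have h2 : ∀ k : Nat, mid ++ z :: t.take (k+1) = (mid ++ [z]) ++ t.take (k+1) := by
      simp
    have h3 : minT a (y :: (mid ++ [z])) = min (minT a (y :: mid)) z := by
      have := minT_append a (y :: mid) z
      simpa using this
    calc (sbF a y (mid ++ [z])) :: (List.range t.length).map
            (fun k => sbF a y (mid ++ z :: t.take (k+1)))
        = (sbF a y (mid ++ [z])) :: (List.range t.length).map
            (fun k => sbF a y ((mid ++ [z]) ++ t.take (k+1))) := by
          congr 1; exact List.map_congr_left (fun k _ => by rw [h2 k])
      _ = _ := by
          rw [ih (mid ++ [z]), h3, h1]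

theorem range_bests0 (a x0 : Int) (x1s : List Int) :
    (List.range (x1s.length + 1)).map (fun k => sbF a x0 (x1s.take k)) = bests0 a (x0 :: x1s) := by
  rw [List.range_succ_eq_map, List.map_cons, List.map_map]
  simp only [Function.comp_def, List.take_zero, bests0]
  have := take_bests x1s a x0 []
  simp only [List.nil_append, minT, List.foldl_cons, List.foldl_nil, sbF] at this ⊢
  rw [this]

-- drop a list at a valid index
theorem drop_getD (prices : List Int) (i : Nat) (h : i < prices.length) :
    prices.drop i = prices.getD i 0 :: prices.drop (i+1) := by
  rw [List.drop_eq_getElem_cons h, List.getD_eq_getElem _ _ h]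

-- closed form of A's single_best on in-range indices
theorem single_best_closed (prices : List Int) (d s : Nat) (h : s + d + 1 < prices.length) :
    single_best prices (s : Int) ((s + d + 1 : Nat) : Int)
      = some (sbF (prices.getD s 0) (prices.getD (s+1) 0) ((prices.drop (s+2)).take d)) := by
  induction d generalizing s with
  | zero =>
    have hs1 : s + 1 < prices.length := by omega
    unfold single_best
    have hr : PySem.List.pyRange (s:Int) ((s+0+1:Nat):Int) 1 = [(s:Int)] := by
      push_cast
      exact PySem.List.pyRange_one_singleton _
    rw [hr]
    have hsl : PySem.List.slice prices (some ((s:Int)+1)) (some ((s:Int)+1+1))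
        = [prices.getD (s+1) 0] := by
      rw [show ((s:Int)+1) = ((s+1:Nat):Int) by push_cast; ring,
        show (((s+1:Nat):Int)+1) = ((s+2:Nat):Int) by push_cast; ring,
        PySem.List.slice_natCast, drop_getD prices (s+1) hs1]
      simp
    have hg : prices[s]? = some (prices[s]'(by omega)) := List.getElem?_eq_getElem _
    simp [List.mapM_cons, sbF, hsl, PySem.List.max?, List.getD_eq_getElem?_getD, hg]
  | succ d ih =>
    have he : s + (d + 1) + 1 = (s+1) + d + 1 := by omega
    rw [he]
    have hs1 : s + 1 < prices.length := by omega
    have hs2 : s + 2 < prices.length := by omega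
    have hlt : (s:Int) < (((s+1)+d+1 : Nat):Int) := by push_cast; omega
    have hIH := ih (s+1) (by omega)
    -- abbreviations
    set a := prices.getD s 0 with ha
    set y := prices.getD (s+1) 0 with hy
    set z := prices.getD (s+2) 0 with hz
    set ys := (prices.drop (s+3)).take d with hys
    unfold single_best at hIH ⊢
    rw [PySem.List.pyRange_one_cons hlt]
    have hcast : ((s:Int)+1) = ((s+1:Nat):Int) := by push_cast; ring
    rw [hcast]
    -- the tail mapM is the one inside hIH
    cases hm : (PySem.List.pyRange ((s+1:Nat):Int) (((s+1)+d+1:Nat):Int) 1).mapM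
        (fun t => do
          let m ← PySem.List.max? (PySem.List.slice prices (some (t+1)) (some ((((s+1)+d+1:Nat):Int)+1))) (fun x => x)
          let p ← PySem.List.pyGet? prices t
          pure (m - p)) with
    | none => rw [hm] at hIH; simp at hIH
    | some vs =>
      rw [hm] at hIH
      simp only [Option.bind_eq_bind, Option.bind_some] at hIH
      -- head value
      have hsl : PySem.List.slice prices (some ((s:Int)+1)) (some ((((s+1)+d+1:Nat):Int)+1))
          = y :: z :: ys := by
        rw [hcast, show ((((s+1)+d+1:Nat):Int)+1) = ((s+d+3:Nat):Int) by push_cast; ring,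
          PySem.List.slice_natCast, drop_getD prices (s+1) hs1, drop_getD prices (s+2) hs2]
        have : s + d + 3 - (s+1) = d + 2 := by omega
        rw [this]
        simp [hys, hy, hz, List.getD_eq_getElem?_getD]
      have hget : PySem.List.pyGet? prices (s:Int) = some a := by
        rw [PySem.List.pyGet?_natCast, List.getElem?_eq_getElem (by omega), ha,
          List.getD_eq_getElem _ _ (by omega)]
      cases vs with
      | nil =>
        have h0 : PySem.List.max? ([]:List Int) (fun x => x) = none :=
          (PySem.List.max?_eq_none_iff _ _).mpr rfl
        rw [h0] at hIH; cases hIH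
      | cons w ws =>
        rw [PySem.List.max?_id_cons] at hIH
        have hV : ws.foldl max w = sbF y z ys := by
          exact Option.some.inj hIH
        simp only [List.mapM_cons, hsl, hget, PySem.List.max?_id_cons, Option.bind_eq_bind,
          Option.pure_def, Option.bind_some]
        simp only [Option.bind_eq_bind, Option.pure_def] at hm
        rw [hm]
        simp only [Option.bind_some]
        rw [PySem.List.max?_id_cons]
        simp only [List.foldl_cons]
        rw [maxT_out, hV]
        have : (prices.drop (s+2)).take (d+1) = z :: ys := by
          rw [drop_getD prices (s+2) hs2]; simp [hys, hz, List.getD_eq_getElem?_getD]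
        rw [this, sbF]
        rfl


-- fold-set over a range of fresh (None) cells is an append of the mapped values
theorem set_fold (m : Nat) (pre : List (Option Int)) (G : Nat → Option Int) (a : Nat)
    (ha : a = pre.length) :
    (List.range m).foldl (fun nl k => nl.set (a + k) (G k)) (pre ++ List.replicate m none)
      = pre ++ (List.range m).map G := by
  induction m generalizing pre G a with
  | zero => simp
  | succ m ih =>
    rw [List.range_succ_eq_map, List.foldl_cons, List.replicate_succ]
    have h1 : (pre ++ (none : Option Int) :: List.replicate m none).set (a + 0) (G 0)
        = (pre ++ [G 0]) ++ List.replicate m none := by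
      subst ha
      rw [List.set_append_right _ _ (by omega)]
      simp
    rw [h1, List.foldl_map]
    have h2 : ∀ (nl : List (Option Int)) (k : Nat),
        nl.set (a + (k + 1)) (G (k+1)) = nl.set ((pre ++ [G 0]).length + k) ((fun j => G (j+1)) k) := by
      intro nl k; simp [ha]; ring_nf
    calc (List.range m).foldl (fun nl k => nl.set (a + (k+1)) (G (k+1)))
            ((pre ++ [G 0]) ++ List.replicate m none)
        = (List.range m).foldl (fun nl k => nl.set ((pre ++ [G 0]).length + k) ((fun j => G (j+1)) k))
            ((pre ++ [G 0]) ++ List.replicate m none) := by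
          exact PySem.List.foldl_congr_mem _ _ _ _ (fun nl k _ => h2 nl k)
      _ = (pre ++ [G 0]) ++ (List.range m).map (fun j => G (j+1)) := ih _ _ _ rfl
      _ = pre ++ (G 0 :: (List.range m).map (fun j => G (j+1))) := by simp
      _ = _ := by simp [Function.comp_def, Nat.succ_eq_add_one]

-- B's inner loop, once the best is some value
theorem bfold_some (ys : List Int) (minp b : Int) (row0 : List (Option Int)) :
    ((ys.foldl (fun st p =>
      let cand := p - st.1
      let best' : Option Int := match st.2.1 with
        | none => some cand
        | some b => if cand > b then some cand else some b
      (if p < st.1 then p else st.1, best', st.2.2 ++ [best']))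
      (minp, (some b : Option Int), row0)).2.2)
      = row0 ++ (bests minp b ys).map some := by
  induction ys generalizing minp b row0 with
  | nil => simp [bests]
  | cons y ys ih =>
    simp only [List.foldl_cons, bests, List.map_cons]
    have hb : (if y - minp > b then some (y - minp) else some b) = some (max b (y - minp)) := by
      split <;> simp <;> omega
    have hm : (if y < minp then y else minp) = min minp y := by split <;> omega
    simp only [hb, hm]
    rw [ih]
    simp

-- the per-start rows agree
theorem row_eq (prices : List Int) (s : Nat) (hs : s + 1 < prices.length) :
    (PySem.List.pyRange ((s : Int)+1) (prices.length : Int) 1).foldl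
      (fun nl e => nl.set e.toNat (single_best prices (s : Int) e))
      (List.replicate prices.length none)
      = bfRow prices s := by
  have hs2le : s + 2 ≤ prices.length := by omega
  set L := prices.length with hL
  set aa := prices.getD s 0 with ha
  set y := prices.getD (s+1) 0 with hy
  set x1s := prices.drop (s+2) with hx1
  have hlen1 : x1s.length = L - (s+2) := by rw [hx1, List.length_drop]
  -- LEFT: A's fold of index-sets over the e-range
  have hcast : ((s:Int)+1) = ((s+1:Nat):Int) := by push_cast; ring
  have htn : (((L:Int)) - ((s+1:Nat):Int)).toNat = L - (s+1) := by omega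
  have hA : (PySem.List.pyRange ((s : Int)+1) ((L : Int)) 1).foldl
      (fun nl e => nl.set e.toNat (single_best prices (s : Int) e))
      (List.replicate L none)
      = List.replicate (s+1) (none : Option Int)
        ++ (List.range (L - (s+1))).map (fun k => single_best prices (s:Int) ((s+1+k : Nat) : Int)) := by
    rw [hcast, PySem.List.pyRange_one, htn, List.foldl_map]
    have hsplit : List.replicate L (none : Option Int)
        = List.replicate (s+1) none ++ List.replicate (L - (s+1)) none := by
      rw [← List.replicate_add]
      congr 1
      omega
    rw [hsplit]
    have hstep : ∀ (nl : List (Option Int)) (k : Nat),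
        nl.set ((((s+1:Nat):Int) + (k:Int)).toNat) (single_best prices (s:Int) (((s+1:Nat):Int) + (k:Int)))
          = nl.set ((s+1) + k) ((fun j => single_best prices (s:Int) ((s+1+j : Nat) : Int)) k) := by
      intro nl k
      have h1 : (((s+1:Nat):Int) + (k:Int)) = ((s+1+k : Nat) : Int) := by push_cast; ring
      rw [h1, Int.toNat_natCast]
    rw [PySem.List.foldl_congr_mem _ _ _ _ (fun nl k _ => hstep nl k)]
    rw [set_fold (L - (s+1)) _ _ (s+1) (by simp)]
  rw [hA]
  -- evaluate each entry by the closed form, then fold B's recursion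
  have hmap : (List.range (L - (s+1))).map (fun k => single_best prices (s:Int) ((s+1+k : Nat) : Int))
      = ((List.range (x1s.length + 1)).map (fun k => sbF aa y (x1s.take k))).map some := by
    have hcount : L - (s+1) = x1s.length + 1 := by omega
    rw [hcount, List.map_map]
    refine List.map_congr_left (fun k hk => ?_)
    have hk' : k < x1s.length + 1 := List.mem_range.mp hk
    have := single_best_closed prices k s (by omega)
    rw [show s+1+k = s+k+1 by omega, this]
    rfl
  rw [hmap, range_bests0]
  -- RIGHT: B's row
  rw [bfRow]
  have hdrop : prices.drop (s+1) = y :: x1s := by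
    rw [drop_getD prices (s+1) (by omega), hy, hx1]
  rw [hdrop]
  simp only [List.foldl_cons]
  have hmin : (if y < aa then y else aa) = min aa y := by
    rcases le_total aa y with h' | h'
    · simp [h']
    · simp [h']
      omega
  simp only [← ha] at *
  rw [show (List.foldl
      (fun st p =>
        let cand := p - st.1
        let best' : Option Int := match st.2.1 with
          | none => some cand
          | some b => if cand > b then some cand else some b
        (if p < st.1 then p else st.1, best', st.2.2 ++ [best']))
      (if y < aa then y else aa, some (y - aa),
        List.replicate (s+1) (none : Option Int) ++ [some (y - aa)]) x1s).2.2
      = (List.replicate (s+1) (none : Option Int) ++ [some (y - aa)])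
          ++ (bests (min aa y) (y - aa) x1s).map some from by rw [hmin]; exact bfold_some _ _ _ _]
  rw [bests0]
  simp

-- ===== VERDICT (by name: the statement is the Claim_ definition above) =====
theorem bf_all_spec : Claim_equal_bf_all := by
  intro prices _
  unfold Spec_bf_all
  simp only [bf_all, bf_all_alt]
  rw [PySem.List.foldl_append_singleton_eq_map, PySem.List.foldl_append_singleton_eq_map,
    PySem.List.pyRange_one]
  have h0 : (((prices.length : Int)) - 1 - 0).toNat = prices.length - 1 := by omega
  rw [h0, List.map_map]
  simp only [List.nil_append, Function.comp_def]
  refine List.map_congr_left (fun k hk => ?_)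
  have hk' : k < prices.length - 1 := List.mem_range.mp hk
  rw [show (0:Int) + (k:Int) = (k:Int) by ring]
  exact row_eq prices k (by omega)
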